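-- pv_equiv track=rewrite | github.com/rh569/advent-of-code-2015 | days/day_08/main.py | part_two
-- ===== SOURCE A (Python) =====
-- from typing import List
--
-- def part_two(input: List[str]):
--     literal_chars = 0
--     escaped_chars = 0
--
--     for l in input:
--         l = l.strip()
--         lc = len(l)
--
--         l = l.replace("\\", "\\\\")
--         l = l.replace("\"", "\\\"")
--
--         l = f'"{l}"'
--
--         le = len(l)
--
--         literal_chars += lc
--         escaped_chars += le
--
--     return escaped_chars - literal_chars
-- ===== SOURCE B (Python) =====
-- from typing import List
--
-- def part_two(input: List[str]):
--     total = 0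
--     for l in input:
--         l = l.strip()
--         total += 2 + l.count('"') + l.count('\\')
--     return total
-- ===== Notes on version B (the rewrite author's own statement) =====
-- stated objective: simpler
-- what changed: B never builds the escaped string: it accumulates the closed-form per-line length delta 2 + count('"') + count('\\') in a single running total, instead of constructing two replaced strings plus quotes and subtracting two separately maintained length sums.
import Mathlib
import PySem

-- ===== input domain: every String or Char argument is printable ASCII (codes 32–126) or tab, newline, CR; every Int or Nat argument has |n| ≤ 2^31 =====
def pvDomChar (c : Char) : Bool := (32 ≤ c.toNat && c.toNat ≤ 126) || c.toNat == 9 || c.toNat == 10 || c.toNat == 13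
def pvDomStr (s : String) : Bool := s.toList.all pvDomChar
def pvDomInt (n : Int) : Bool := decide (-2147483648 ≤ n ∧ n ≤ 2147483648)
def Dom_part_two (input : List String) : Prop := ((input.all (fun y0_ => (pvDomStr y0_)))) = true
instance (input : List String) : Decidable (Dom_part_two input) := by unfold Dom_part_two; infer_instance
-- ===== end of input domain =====

-- B computes the per-line length delta in closed form instead of building the escaped strings (objective: simpler).

-- ===== PORT A =====
def part_two (input : List String) : Int :=
  let st := input.foldl (fun (st : Int × Int) l₀ =>
      let l := PySem.Str.strip l₀
      let lc := PySem.Str.len l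
      let l := PySem.Str.replace l "\\" "\\\\"
      let l := PySem.Str.replace l "\"" "\\\""
      let l := "\"" ++ l ++ "\""
      let le := PySem.Str.len l
      (st.1 + lc, st.2 + le)) (0, 0)
  st.2 - st.1

-- ===== PORT B =====
def part_two_alt (input : List String) : Int :=
  input.foldl (fun total l₀ =>
      let l := PySem.Str.strip l₀
      total + (2 + (PySem.Str.count l "\"" : Int) + (PySem.Str.count l "\\" : Int))) 0

-- ===== PRECONDITION & SPEC =====
def Spec_part_two (input : List String) (out : Int) : Prop := out = part_two_alt input
instance (input : List String) (out : Int) : Decidable (Spec_part_two input out) := by unfold Spec_part_two; infer_instance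

-- ===== CLAIM (what is proved, stated in full; the proofs are below) =====
def Claim_equal_part_two : Prop := ∀ (input : List String), Dom_part_two input → Spec_part_two input (part_two input)

-- ===== LEMMAS AND PROOFS =====

-- single-character replace is a flatMap
theorem replace_single_go (c : Char) (new : List Char) :
    ∀ (s : List Char) (fuel : Nat) (acc : List Char), s.length ≤ fuel →
      PySem.Chars.replace.go [c] new fuel s acc
        = acc.reverse ++ s.flatMap (fun x => if x = c then new else [x]) := by
  intro s
  induction s with
  | nil =>
    intro fuel acc _
    cases fuel <;> simp [PySem.Chars.replace.go]
  | cons x t ih =>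
    intro fuel acc h
    cases fuel with
    | zero => simp at h
    | succ fuel =>
      by_cases hx : x = c
      · have hp : ([c].isPrefixOf (x :: t)) = true := by
          subst hx; simp [List.isPrefixOf]
        simp only [PySem.Chars.replace.go, hp]
        rw [show List.drop ([c].length) (x :: t) = t by simp]
        rw [ih fuel (new.reverse ++ acc) (by simpa using Nat.lt_succ_iff.mp (by simpa using h))]
        subst hx
        simp
      · have hp : ([c].isPrefixOf (x :: t)) = false := by
          simp only [List.isPrefixOf, Bool.and_eq_false_iff]
          left
          simpa using fun h => hx h.symm
        simp only [PySem.Chars.replace.go, hp]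
        rw [ih fuel (x :: acc) (by simpa using Nat.lt_succ_iff.mp (by simpa using h))]
        simp [hx]

theorem replace_single (s : List Char) (c : Char) (new : List Char) :
    PySem.Chars.replace s [c] new = s.flatMap (fun x => if x = c then new else [x]) := by
  simp [PySem.Chars.replace]
  rw [replace_single_go c new s s.length [] le_rfl]
  simp

-- single-character count is List.count
theorem count_single_go (c : Char) :
    ∀ (s : List Char) (fuel : Nat) (acc : Nat), s.length ≤ fuel →
      PySem.Chars.count.go [c] fuel s acc = acc + s.count c := by
  intro s
  induction s with
  | nil =>
    intro fuel acc _
    cases fuel <;> simp [PySem.Chars.count.go]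
  | cons x t ih =>
    intro fuel acc h
    cases fuel with
    | zero => simp at h
    | succ fuel =>
      have ht : t.length ≤ fuel := by simpa using Nat.lt_succ_iff.mp (by simpa using h)
      by_cases hx : x = c
      · have hp : ([c].isPrefixOf (x :: t)) = true := by
          subst hx; simp [List.isPrefixOf]
        simp only [PySem.Chars.count.go, hp]
        rw [show List.drop ([c].length) (x :: t) = t by simp]
        rw [ih fuel (acc + 1) ht]
        subst hx
        simp [List.count_cons]
        omega
      · have hp : ([c].isPrefixOf (x :: t)) = false := by
          simp only [List.isPrefixOf, Bool.and_eq_false_iff]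
          left
          simpa using fun h => hx h.symm
        simp only [PySem.Chars.count.go, hp]
        rw [ih fuel acc ht]
        simp [List.count_cons, hx]

theorem count_single (s : List Char) (c : Char) :
    PySem.Chars.count s [c] = s.count c := by
  simp [PySem.Chars.count]
  rw [count_single_go c s s.length 0 le_rfl]
  omega

-- the double-escape pass adds exactly one character per backslash or quote
theorem escape_length (t : List Char) :
    ((t.flatMap (fun x => if x = '\\' then ['\\', '\\'] else [x])).flatMap
        (fun x => if x = '"' then ['\\', '"'] else [x])).length
      = t.length + t.count '\\' + t.count '"' := by
  induction t with
  | nil => simp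
  | cons x t ih =>
    by_cases hb : x = '\\'
    · subst hb; simp [List.count_cons, ih]; omega
    · by_cases hq : x = '"'
      · subst hq; simp [List.count_cons, ih]; omega
      · simp [hb, hq, ih]
        omega

-- per-line: escaped length minus literal length in closed form
theorem line_delta (s : String) :
    PySem.Str.len ("\"" ++ PySem.Str.replace (PySem.Str.replace s "\\" "\\\\") "\"" "\\\"" ++ "\"")
      - PySem.Str.len s
      = 2 + (PySem.Str.count s "\"" : Int) + (PySem.Str.count s "\\" : Int) := by
  rw [PySem.Str.len_append, PySem.Str.len_append]
  rw [PySem.Str.len_eq, PySem.Str.len_eq, PySem.Str.len_eq]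
  rw [PySem.Str.count_eq, PySem.Str.count_eq]
  rw [PySem.Str.toList_replace, PySem.Str.toList_replace]
  have hb : ("\\" : String).toList = ['\\'] := rfl
  have hbb : ("\\\\" : String).toList = ['\\', '\\'] := rfl
  have hq : ("\"" : String).toList = ['"'] := rfl
  have hbq : ("\\\"" : String).toList = ['\\', '"'] := rfl
  rw [hb, hbb, hq, hbq, replace_single, replace_single, count_single, count_single]
  rw [escape_length]
  push_cast
  norm_num
  ring

theorem fold_eq (input : List String) :
    ∀ (lit esc : Int),
      (input.foldl (fun (st : Int × Int) l₀ =>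
          (st.1 + PySem.Str.len (PySem.Str.strip l₀),
           st.2 + PySem.Str.len ("\"" ++ PySem.Str.replace
              (PySem.Str.replace (PySem.Str.strip l₀) "\\" "\\\\") "\"" "\\\"" ++ "\""))) (lit, esc)).2
      - (input.foldl (fun (st : Int × Int) l₀ =>
          (st.1 + PySem.Str.len (PySem.Str.strip l₀),
           st.2 + PySem.Str.len ("\"" ++ PySem.Str.replace
              (PySem.Str.replace (PySem.Str.strip l₀) "\\" "\\\\") "\"" "\\\"" ++ "\""))) (lit, esc)).1
      = input.foldl (fun total l₀ =>
          total + (2 + (PySem.Str.count (PySem.Str.strip l₀) "\"" : Int)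
                     + (PySem.Str.count (PySem.Str.strip l₀) "\\" : Int)))
          (esc - lit) := by
  induction input with
  | nil => intro lit esc; simp
  | cons x t ih =>
    intro lit esc
    simp only [List.foldl_cons]
    rw [ih]
    congr 1
    have := line_delta (PySem.Str.strip x)
    omega

-- ===== VERDICT (by name: the statement is the Claim_ definition above) =====
theorem part_two_spec : Claim_equal_part_two := by
  intro input _
  unfold Spec_part_two part_two part_two_alt
  simpa using fold_eq input 0 0
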